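-- pv_equiv track=rewrite | github.com/hyodamon/BOJ_practice | 코테2.py | solution
-- ===== SOURCE A (Python) =====
-- def solution (arr) :
--     answer = []
--     arr.sort()
--
--     cnt = 1
--     for i in range(1, len(arr)) :
--         if arr[i] == arr[i-1] :
--             cnt += 1
--         else :
--             if cnt > 1 :
--                 answer.append(cnt)
--             cnt = 1
--
--     if cnt > 1 :
--         answer.append(cnt)
--     if len(answer) == 0 :
--         answer.append(-1)
--
--     return answer
-- ===== SOURCE B (Python) =====
-- def solution(arr):
--     # different structure: sort (same in-place side effect as A), build a
--     # frequency table in one pass, then emit counts > 1 over the sorted keys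
--     arr.sort()
--     counts = {}
--     for x in arr:
--         counts[x] = counts.get(x, 0) + 1
--     answer = [counts[k] for k in sorted(counts) if counts[k] > 1]
--     return answer if answer else [-1]
-- ===== Notes on version B (the rewrite author's own statement) =====
-- stated objective: idiomatic
-- what changed: A's boundary-detecting single scan with a run counter is replaced by building a frequency table of the sorted list and emitting the counts > 1 over its sorted keys.
import Mathlib
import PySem

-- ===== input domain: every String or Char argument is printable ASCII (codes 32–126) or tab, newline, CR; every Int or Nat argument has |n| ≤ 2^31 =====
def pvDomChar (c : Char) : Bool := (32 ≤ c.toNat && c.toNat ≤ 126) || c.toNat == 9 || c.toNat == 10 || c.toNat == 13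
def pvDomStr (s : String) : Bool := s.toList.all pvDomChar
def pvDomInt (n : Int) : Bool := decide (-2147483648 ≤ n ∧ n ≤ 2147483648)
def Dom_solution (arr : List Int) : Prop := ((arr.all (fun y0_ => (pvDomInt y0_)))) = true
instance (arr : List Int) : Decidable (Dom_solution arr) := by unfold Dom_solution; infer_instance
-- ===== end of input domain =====

-- B replaces A's boundary-detecting scan by a frequency table read off over the sorted keys
-- (objective: idiomatic); equivalence is about the RETURN value — both Pythons sort arr in place.

-- ===== PORT A =====
def solution (arr : List Int) : List Int :=
  let s := PySem.List.sorted arr (fun x => x) false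
  let st := (PySem.List.pyRange 1 (PySem.List.len s) 1).foldl
    (fun (st : Int × List Int) i =>
      if PySem.List.pyGetD s i 0 == PySem.List.pyGetD s (i - 1) 0 then
        (st.1 + 1, st.2)
      else
        (1, if 1 < st.1 then st.2 ++ [st.1] else st.2))
    (1, ([] : List Int))
  let answer := if 1 < st.1 then st.2 ++ [st.1] else st.2
  if answer.length = 0 then answer ++ [-1] else answer

-- ===== PORT B =====
-- counts[k] in the comprehension is ported as getD (k is always a key of counts there)
def solution_alt (arr : List Int) : List Int :=
  let s := PySem.List.sorted arr (fun x => x) false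
  let counts := s.foldl (fun (d : PySem.Dict Int Int) x => d.insert x (d.getD x 0 + 1)) PySem.Dict.empty
  let answer := (PySem.List.sorted counts.keys (fun k => k) false).filterMap
    (fun k => if 1 < counts.getD k 0 then some (counts.getD k 0) else none)
  if answer = [] then [-1] else answer

-- ===== PRECONDITION & SPEC =====
def Spec_solution (arr : List Int) (out : List Int) : Prop := out = solution_alt arr
instance (arr : List Int) (out : List Int) : Decidable (Spec_solution arr out) := by unfold Spec_solution; infer_instance

-- ===== CLAIM (what is proved, stated in full; the proofs are below) =====
def Claim_equal_solution : Prop := ∀ (arr : List Int), Dom_solution arr → Spec_solution arr (solution arr)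

-- ===== LEMMAS AND PROOFS =====

-- what A appends when a run of length c ends
def emitRun (c : Int) : List Int := if 1 < c then [c] else []

-- A's scan, restated structurally on the tail of the sorted list
def scanA (prev : Int) (cnt : Int) : List Int → List Int
  | [] => emitRun cnt
  | x :: xs => if x = prev then scanA x (cnt + 1) xs else emitRun cnt ++ scanA x 1 xs

-- B's answer on a list u (keys in first-occurrence order, counts from u)
def ansB (u : List Int) : List Int :=
  (PySem.Set.ofList u).filterMap
    (fun k => if 1 < (u.count k : Int) then some ((u.count k : Int)) else none)

theorem zip_pair_aux (s : List Int) :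
    (List.range (s.length - 1)).map (fun k => (s.getD k 0, s.getD (k+1) 0)) = s.zip s.tail := by
  induction s with
  | nil => simp
  | cons a t ih =>
    cases t with
    | nil => simp
    | cons b t' =>
      simp only [List.length_cons, Nat.add_sub_cancel] at *
      rw [List.range_succ_eq_map]
      simp only [List.map_cons, List.map_map]
      simp only [List.tail_cons] at ih ⊢
      refine congrArg₂ _ rfl ?_
      have hf : ((fun k => ((a :: b :: t').getD k 0, (a :: b :: t').getD (k + 1) 0)) ∘ Nat.succ)
          = (fun k => ((b :: t').getD k 0, (b :: t').getD (k + 1) 0)) := rfl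
      rw [hf]
      exact ih

theorem map_pair_range (s : List Int) :
    (PySem.List.pyRange 1 (PySem.List.len s) 1).map
      (fun i => (PySem.List.pyGetD s (i - 1) 0, PySem.List.pyGetD s i 0))
      = s.zip s.tail := by
  rw [PySem.List.pyRange_one, List.map_map]
  have h : ∀ k : Nat, ((fun i => (PySem.List.pyGetD s (i - 1) 0, PySem.List.pyGetD s i 0)) ∘ fun k : Nat => (1 : Int) + ↑k) k
      = (fun k : Nat => (s.getD k 0, s.getD (k+1) 0)) k := by
    intro k
    simp only [Function.comp]
    have h1 : (1 : Int) + ↑k - 1 = (k : Int) := by ring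
    have h2 : (1 : Int) + ↑k = ((k + 1 : Nat) : Int) := by push_cast; ring
    rw [h1, h2, PySem.List.pyGetD_natCast, PySem.List.pyGetD_natCast]
  rw [List.map_congr_left (fun k _ => h k)]
  have hlen : ((PySem.List.len s) - 1).toNat = s.length - 1 := by
    simp only [PySem.List.len]; omega
  rw [hlen, zip_pair_aux]

theorem fold_eq_scanA (t : List Int) :
    ∀ (prev cnt : Int) (ans : List Int),
    (let r := ((prev :: t).zip t).foldl
        (fun (st : Int × List Int) (p : Int × Int) =>
          if p.2 == p.1 then (st.1 + 1, st.2)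
          else (1, if 1 < st.1 then st.2 ++ [st.1] else st.2)) (cnt, ans)
     (if 1 < r.1 then r.2 ++ [r.1] else r.2)) = ans ++ scanA prev cnt t := by
  induction t with
  | nil =>
    intro prev cnt ans
    simp [scanA, emitRun]
    split_ifs <;> simp
  | cons x t' ih =>
    intro prev cnt ans
    simp only [List.zip_cons_cons, List.foldl_cons]
    by_cases hx : x = prev
    · simp only [hx, scanA, beq_self_eq_true, if_true]
      exact ih prev (cnt + 1) ans
    · have hb : (x == prev) = false := by simp [hx]
      simp only [scanA, hb, if_neg hx, Bool.false_eq_true, if_false]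
      rw [← List.append_assoc]
      have := ih x 1 (if 1 < cnt then ans ++ [cnt] else ans)
      simp only at this ⊢
      rw [this]
      unfold emitRun
      split_ifs <;> simp

-- general: foldl add over a list skips already-present elements
theorem foldl_add_filter_mem {α : Type} [BEq α] [LawfulBEq α] (xs : List α) :
    ∀ (acc : List α) (x : α), x ∈ acc →
    xs.foldl PySem.Set.add acc = (xs.filter (fun y => !(y == x))).foldl PySem.Set.add acc := by
  induction xs with
  | nil => intro acc x _; simp
  | cons z xs ih =>
    intro acc x hx
    by_cases hz : z = x
    · subst hz
      have : PySem.Set.add acc z = acc := by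
        simp [PySem.Set.add, PySem.Set.contains, hx]
      simp only [List.foldl_cons, List.filter_cons, beq_self_eq_true, Bool.not_true, this]
      exact ih acc z hx
    · have hb : (z == x) = false := by simp [hz]
      simp only [List.foldl_cons, List.filter_cons, hb, Bool.not_false]
      apply ih
      simp [PySem.Set.add]
      split_ifs <;> simp [hx]
theorem foldl_add_append {α : Type} [BEq α] [LawfulBEq α] :
    ∀ (xs acc : List α), (∀ y ∈ xs, y ∉ acc) →
    xs.foldl PySem.Set.add acc = acc ++ PySem.Set.ofList xs := by
  intro xs
  induction hn : xs.length using Nat.strong_induction_on generalizing xs with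
  | _ n ih =>
    cases xs with
    | nil => intro acc _; simp [PySem.Set.ofList]
    | cons x xs =>
      intro acc hacc
      have hxa : x ∉ acc := hacc x (by simp)
      have hadd : PySem.Set.add acc x = acc ++ [x] := by
        simp [PySem.Set.add, PySem.Set.contains]
        intro h; exact absurd h hxa
      have hlt : (xs.filter (fun y => !(y == x))).length < n := by
        subst hn
        simp only [List.length_cons]
        exact Nat.lt_succ_of_le (List.length_filter_le _ _)
      have hstep : ∀ y ∈ xs.filter (fun y => !(y == x)), y ∉ acc ++ [x] := by
        intro y hy
        have hy' := List.of_mem_filter hy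
        have hym := List.mem_of_mem_filter hy
        simp at hy'
        simp [hy']
        exact fun h => (hacc y (by simp [hym])) h
      calc (x :: xs).foldl PySem.Set.add acc
          = xs.foldl PySem.Set.add (PySem.Set.add acc x) := rfl
        _ = (xs.filter (fun y => !(y == x))).foldl PySem.Set.add (acc ++ [x]) := by
              rw [hadd] at *
              exact foldl_add_filter_mem xs (acc ++ [x]) x (by simp)
        _ = (acc ++ [x]) ++ PySem.Set.ofList (xs.filter (fun y => !(y == x))) := ih _ hlt _ rfl _ hstep
        _ = acc ++ (x :: PySem.Set.ofList (xs.filter (fun y => !(y == x)))) := by simp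
        _ = acc ++ PySem.Set.ofList (x :: xs) := by
              congr 1
              have h1 : PySem.Set.ofList (x :: xs) = xs.foldl PySem.Set.add [x] := by
                simp [PySem.Set.ofList_eq_foldl, PySem.Set.add, PySem.Set.contains]
              rw [h1, foldl_add_filter_mem xs [x] x (by simp),
                 ih _ hlt _ rfl _ (by intro y hy; have := List.of_mem_filter hy; simp_all)]
              simp

theorem ofList_cons {α : Type} [BEq α] [LawfulBEq α] (x : α) (xs : List α) :
    PySem.Set.ofList (x :: xs) = x :: PySem.Set.ofList (xs.filter (fun y => !(y == x))) := by
  have h1 : PySem.Set.ofList (x :: xs) = xs.foldl PySem.Set.add [x] := by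
    simp [PySem.Set.ofList_eq_foldl, PySem.Set.add, PySem.Set.contains]
  rw [h1, foldl_add_filter_mem xs [x] x (by simp),
    foldl_add_append _ _ (by intro y hy; have := List.of_mem_filter hy; simp_all)]
  simp

theorem ofList_sublist {α : Type} [BEq α] [LawfulBEq α] (xs : List α) :
    (PySem.Set.ofList xs).Sublist xs := by
  induction hn : xs.length using Nat.strong_induction_on generalizing xs with
  | _ n ih =>
    cases xs with
    | nil => simp [PySem.Set.ofList]
    | cons x xs =>
      rw [ofList_cons]
      apply List.Sublist.cons₂
      subst hn
      exact ((ih _ (Nat.lt_succ_of_le (List.length_filter_le _ _)) _ rfl)).trans List.filter_sublist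

theorem ansB_cons (x : Int) (t : List Int) :
    ansB (x :: t) = (if 1 < (1 + (t.count x : Int)) then [1 + (t.count x : Int)] else [])
      ++ ansB (t.filter (fun y => !(y == x))) := by
  unfold ansB
  rw [ofList_cons, List.filterMap_cons]
  have hc : ((x :: t).count x : Int) = 1 + (t.count x : Int) := by
    rw [List.count_cons_self]; push_cast; ring
  have hcong : ∀ k ∈ PySem.Set.ofList (t.filter (fun y => !(y == x))),
      ((x :: t).count k : Int) = ((t.filter (fun y => !(y == x))).count k : Int) := by
    intro k hk
    have hkm : k ∈ t.filter (fun y => !(y == x)) := by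
      have := PySem.Set.mem_ofList (xs := t.filter (fun y => !(y == x))) (y := k)
      exact this.mp hk
    have hkx : k ≠ x := by
      have := List.of_mem_filter hkm; simpa using this
    have e1 : List.count k (x :: t) = List.count k t := by
      simp [Ne.symm hkx]
    have e2 : List.count k (List.filter (fun y => !(y == x)) t) = List.count k t :=
      List.count_filter (by simpa using hkx)
    rw [e1, e2]
  have := List.filterMap_congr (l := PySem.Set.ofList (t.filter (fun y => !(y == x))))
    (f := fun k => if 1 < ((x :: t).count k : Int) then some (((x :: t).count k : Int)) else none)
    (g := fun k => if 1 < ((t.filter (fun y => !(y == x))).count k : Int) then some (((t.filter (fun y => !(y == x))).count k : Int)) else none)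
    (by intro k hk; simp only [hcong k hk])
  rw [this, hc]
  split_ifs <;> simp

theorem pairwise_cons_of_cons_cons {prev x : Int} {t : List Int}
    (h : (prev :: x :: t).Pairwise (· ≤ ·)) : (prev :: t).Pairwise (· ≤ ·) := by
  rcases List.pairwise_cons.mp h with ⟨h1, h2⟩
  exact List.pairwise_cons.mpr ⟨fun y hy => h1 y (by simp [hy]), (List.pairwise_cons.mp h2).2⟩

theorem scanA_eq_ansB (t : List Int) :
    ∀ (prev cnt : Int), 1 ≤ cnt → (prev :: t).Pairwise (· ≤ ·) →
    scanA prev cnt t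
      = (if 1 < cnt + (t.count prev : Int) then [cnt + (t.count prev : Int)] else [])
        ++ ansB (t.filter (fun y => !(y == prev))) := by
  induction t with
  | nil =>
    intro prev cnt h1 _
    simp [scanA, emitRun, ansB]
  | cons x t' ih =>
    intro prev cnt h1 hp
    by_cases hx : x = prev
    · subst hx
      rw [scanA, if_pos rfl]
      rw [ih x (cnt + 1) (by omega) (pairwise_cons_of_cons_cons hp)]
      have h2 : cnt + 1 + (t'.count x : Int) = cnt + ((x :: t').count x : Int) := by
        rw [List.count_cons_self]; push_cast; ring
      rw [h2]
      congr 2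
      simp
    · rw [scanA, if_neg hx]
      have hple : ∀ y ∈ x :: t', prev ≤ y := (List.pairwise_cons.mp hp).1
      have hxle : ∀ y ∈ t', x ≤ y := (List.pairwise_cons.mp (List.pairwise_cons.mp hp).2).1
      have hnp : prev ∉ x :: t' := by
        simp only [List.mem_cons]
        rintro (rfl | hmem)
        · exact hx rfl
        · exact hx (le_antisymm (hxle _ hmem) (hple x List.mem_cons_self))
      have hcnt : ((x :: t').count prev : Int) = 0 := by
        rw [List.count_eq_zero.mpr hnp]; rfl
      have hfilt : (x :: t').filter (fun y => !(y == prev)) = x :: t' := by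
        rw [List.filter_eq_self]
        intro y hy
        simp only [Bool.not_eq_eq_eq_not, Bool.not_true, beq_eq_false_iff_ne]
        intro he; exact hnp (he ▸ hy)
      rw [hcnt, hfilt]
      have hmain : scanA x 1 t' = ansB (x :: t') := by
        rw [ih x 1 (by omega) (List.pairwise_cons.mp hp).2, ansB_cons]
      rw [hmain]
      simp only [emitRun, add_zero]

theorem body_eq (s : List Int) (hpw : s.Pairwise (· ≤ ·)) :
    (let st := (PySem.List.pyRange 1 (PySem.List.len s) 1).foldl
        (fun (st : Int × List Int) i =>
          if PySem.List.pyGetD s i 0 == PySem.List.pyGetD s (i - 1) 0 then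
            (st.1 + 1, st.2)
          else
            (1, if 1 < st.1 then st.2 ++ [st.1] else st.2))
        (1, ([] : List Int))
     let answer := if 1 < st.1 then st.2 ++ [st.1] else st.2
     if answer.length = 0 then answer ++ [-1] else answer)
    = (let counts := s.foldl (fun (d : PySem.Dict Int Int) x => d.insert x (d.getD x 0 + 1)) PySem.Dict.empty
       let answer := (PySem.List.sorted counts.keys (fun k => k) false).filterMap
          (fun k => if 1 < counts.getD k 0 then some (counts.getD k 0) else none)
       if answer = [] then [-1] else answer) := by
  cases s with
  | nil => rfl
  | cons h t =>
  -- B side: the insert loop is Counter, lookups are counts, keys are the sorted distinct values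
  rw [PySem.Dict.foldl_insert_getD_add_one_eq_counter]
  simp only [PySem.Dict.getD_counter, PySem.Dict.keys_counter]
  have hkeys : PySem.List.sorted (PySem.Set.ofList (h :: t)) (fun k => k) false
      = PySem.Set.ofList (h :: t) :=
    PySem.List.eq_of_perm_of_pairwise_le_of_injective (fun k => k) (fun _ _ hq => hq)
      (PySem.List.sorted_perm _ _ _) (PySem.List.sorted_pairwise _ _)
      (hpw.sublist (ofList_sublist (h :: t)))
  rw [hkeys]
  -- A side: index fold = fold over adjacent pairs = scanA
  have hmap := map_pair_range (h :: t)
  simp only [List.tail_cons] at hmap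
  have hfoldeq : (PySem.List.pyRange 1 (PySem.List.len (h :: t)) 1).foldl
      (fun (st : Int × List Int) i =>
        if PySem.List.pyGetD (h :: t) i 0 == PySem.List.pyGetD (h :: t) (i - 1) 0 then
          (st.1 + 1, st.2)
        else
          (1, if 1 < st.1 then st.2 ++ [st.1] else st.2))
      (1, ([] : List Int))
      = ((h :: t).zip t).foldl
        (fun (st : Int × List Int) (p : Int × Int) =>
          if p.2 == p.1 then (st.1 + 1, st.2)
          else (1, if 1 < st.1 then st.2 ++ [st.1] else st.2)) (1, ([] : List Int)) := by
    rw [← hmap, List.foldl_map]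
  rw [hfoldeq]
  have hA := fold_eq_scanA t h 1 []
  simp only [List.nil_append] at hA
  rw [hA]
  have hB : scanA h 1 t = ansB (h :: t) := by
    rw [scanA_eq_ansB t h 1 (by omega) hpw, ansB_cons]
  rw [hB]
  show (if (ansB (h :: t)).length = 0 then ansB (h :: t) ++ [-1] else ansB (h :: t))
    = (if ansB (h :: t) = [] then [-1] else ansB (h :: t))
  cases hansb : ansB (h :: t) <;> simp

-- ===== VERDICT (by name: the statement is the Claim_ definition above) =====
theorem solution_spec : Claim_equal_solution := by
  intro arr _
  unfold Spec_solution solution solution_alt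
  exact body_eq _ (PySem.List.sorted_pairwise arr (fun x => x))
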